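-- pv_equiv track=rewrite | github.com/ffahimi/scchal | src/search_ranking/BodyRanking.py | get_term_frequencies
-- ===== SOURCE A (Python) =====
-- def get_term_frequencies(terms_indexes):
--
--     terms_frequncies = []
--     sum_of_term_frequencies = 0
--     count_of_non_existing_terms_in_body = 0
--
--     for term_indexes in terms_indexes:
--         terms_frequncies.append(len(term_indexes))
--         sum_of_term_frequencies += len(term_indexes)
--         if len(term_indexes) == 0:
--             count_of_non_existing_terms_in_body += 1
--
--     return terms_frequncies, count_of_non_existing_terms_in_body, sum_of_term_frequencies
-- ===== SOURCE B (Python) =====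
-- def get_term_frequencies(terms_indexes):
--     # divide-and-conquer: split the list in halves, solve each half,
--     # combine the (frequencies, empty-count, total) triples.
--     if not terms_indexes:
--         return [], 0, 0
--     if len(terms_indexes) == 1:
--         f = len(terms_indexes[0])
--         return [f], (1 if f == 0 else 0), f
--     mid = len(terms_indexes) // 2
--     lf, le, ls = get_term_frequencies(terms_indexes[:mid])
--     rf, re, rs = get_term_frequencies(terms_indexes[mid:])
--     return lf + rf, le + re, ls + rs
-- ===== Notes on version B (the rewrite author's own statement) =====
-- stated objective: alternative
-- what changed: Replaces A's single fused three-accumulator loop with a divide-and-conquer recursion: split the list in halves, solve each half, and merge the (frequencies, empty-count, total) triples; correct because all three aggregates are homomorphic under list concatenation.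
import Mathlib
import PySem

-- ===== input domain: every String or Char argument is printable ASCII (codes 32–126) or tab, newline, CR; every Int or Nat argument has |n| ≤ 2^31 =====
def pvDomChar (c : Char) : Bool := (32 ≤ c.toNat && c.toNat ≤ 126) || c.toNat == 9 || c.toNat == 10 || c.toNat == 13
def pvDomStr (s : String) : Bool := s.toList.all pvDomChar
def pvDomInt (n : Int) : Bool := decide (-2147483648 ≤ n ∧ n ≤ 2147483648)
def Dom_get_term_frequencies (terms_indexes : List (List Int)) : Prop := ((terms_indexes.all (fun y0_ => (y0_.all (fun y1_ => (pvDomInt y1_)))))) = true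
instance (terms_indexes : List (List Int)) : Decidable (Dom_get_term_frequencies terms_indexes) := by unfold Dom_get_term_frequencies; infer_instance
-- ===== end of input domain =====

-- B replaces A's single fused three-accumulator loop with a divide-and-conquer
-- recursion (split in halves, merge the triples); alternative decomposition.

-- ===== PORT A =====
-- literal port of A's single loop carrying the three accumulators
def get_term_frequencies (terms_indexes : List (List Int)) : List Int × Int × Int :=
  let st := terms_indexes.foldl
    (fun (st : List Int × Int × Int) term_indexes =>
      let freqs := st.1 ++ [(term_indexes.length : Int)]
      let s := st.2.1 + (term_indexes.length : Int)
      let c := if (term_indexes.length : Int) = 0 then st.2.2 + 1 else st.2.2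
      (freqs, s, c))
    ([], 0, 0)
  (st.1, st.2.2, st.2.1)

-- ===== PORT B =====
-- divide and conquer: halve the list, recurse on each half, merge the triples
def get_term_frequencies_alt : List (List Int) → List Int × Int × Int
  | [] => ([], 0, 0)
  | [t] => ([(t.length : Int)], if t.length = 0 then 1 else 0, (t.length : Int))
  | a :: b :: rest =>
    let mid := (a :: b :: rest).length / 2
    let L := get_term_frequencies_alt ((a :: b :: rest).take mid)
    let R := get_term_frequencies_alt ((a :: b :: rest).drop mid)
    (L.1 ++ R.1, L.2.1 + R.2.1, L.2.2 + R.2.2)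
termination_by l => l.length
decreasing_by
  · simp; omega
  · simp; omega

-- ===== PRECONDITION & SPEC =====
def Spec_get_term_frequencies (terms_indexes : List (List Int)) (out : List Int × Int × Int) : Prop := out = get_term_frequencies_alt terms_indexes
instance (terms_indexes : List (List Int)) (out : List Int × Int × Int) : Decidable (Spec_get_term_frequencies terms_indexes out) := by unfold Spec_get_term_frequencies; infer_instance

-- ===== CLAIM (what is proved, stated in full; the proofs are below) =====
def Claim_equal_get_term_frequencies : Prop := ∀ (terms_indexes : List (List Int)), Dom_get_term_frequencies terms_indexes → Spec_get_term_frequencies terms_indexes (get_term_frequencies terms_indexes)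

-- ===== LEMMAS AND PROOFS =====

-- the common characterisation of both results
def gtfSpecTriple (l : List (List Int)) : List Int × Int × Int :=
  (l.map (fun t => (t.length : Int)),
   ((l.map (fun t => (t.length : Int))).count 0 : Int),
   (l.map (fun t => (t.length : Int))).sum)

-- B computes the characterisation
theorem gtf_alt_eq (l : List (List Int)) :
    get_term_frequencies_alt l = gtfSpecTriple l := by
  fun_induction get_term_frequencies_alt l with
  | case1 => simp [gtfSpecTriple]
  | case2 t =>
    by_cases h0 : t.length = 0 <;>
      simp [gtfSpecTriple, h0, Int.natCast_eq_zero]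
  | case3 a b rest mid L R ihL ihR =>
    simp only [L, R]
    rw [ihL, ihR]
    simp only [gtfSpecTriple]
    have hsplit : (a :: b :: rest).take mid ++ (a :: b :: rest).drop mid = a :: b :: rest :=
      List.take_append_drop _ _
    rw [← hsplit]
    simp
    rw [← Nat.cast_add, ← List.count_append, List.take_append_drop]

-- generalized loop invariant: A's foldl from any start state equals the aggregates added on
theorem gtf_foldl_eq (l : List (List Int)) (fs : List Int) (s c : Int) :
    l.foldl
      (fun (st : List Int × Int × Int) term_indexes =>
        let freqs := st.1 ++ [(term_indexes.length : Int)]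
        let s := st.2.1 + (term_indexes.length : Int)
        let c := if (term_indexes.length : Int) = 0 then st.2.2 + 1 else st.2.2
        (freqs, s, c))
      (fs, s, c)
    = (fs ++ l.map (fun t => (t.length : Int)),
       s + (l.map (fun t => (t.length : Int))).sum,
       c + ((l.map (fun t => (t.length : Int))).count 0 : Int)) := by
  induction l generalizing fs s c with
  | nil => simp
  | cons h t ih =>
    simp only [List.foldl_cons, List.map_cons, List.sum_cons, List.count_cons, ih]
    refine Prod.ext ?_ (Prod.ext ?_ ?_)
    · simp
    · simp; ring
    · simp only [beq_iff_eq]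
      by_cases h0 : ((h.length : Int) = 0)
      · simp [h0]; ring
      · have hne : h ≠ [] := by intro he; subst he; simp at h0
        simp [hne]

-- ===== VERDICT (by name: the statement is the Claim_ definition above) =====
theorem get_term_frequencies_spec : Claim_equal_get_term_frequencies := by
  intro l _
  unfold Spec_get_term_frequencies get_term_frequencies
  rw [gtf_alt_eq]
  simp only [gtf_foldl_eq, gtfSpecTriple]
  simp
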